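-- pv_equiv track=rewrite | github.com/jyoti2000-star/CASM | src/utils/c_processor.py | _clean_intel_operands
-- ===== SOURCE A (Python) =====
-- def _clean_intel_operands(operands: str) -> str:
--     """Clean operands for Intel NASM format"""
--     # Remove common AT&T syntax elements
--     operands = operands.replace('%', '')  # Remove register % prefix
--     operands = operands.replace('$', '')  # Remove immediate $ prefix
--
--     # Handle memory references
--     operands = operands.replace('(', '[').replace(')', ']')
--
--     # Common register name fixes
--     register_map = {
--         'eax': 'eax', 'ebx': 'ebx', 'ecx': 'ecx', 'edx': 'edx',
--         'rax': 'rax', 'rbx': 'rbx', 'rcx': 'rcx', 'rdx': 'rdx',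
--         'rsi': 'rsi', 'rdi': 'rdi', 'rbp': 'rbp', 'rsp': 'rsp',
--         'r8': 'r8', 'r9': 'r9', 'r10': 'r10', 'r11': 'r11',
--         'r12': 'r12', 'r13': 'r13', 'r14': 'r14', 'r15': 'r15'
--     }
--
--     for old_reg, new_reg in register_map.items():
--         operands = operands.replace(old_reg, new_reg)
--
--     return operands
-- ===== SOURCE B (Python) =====
-- _MAP = {'%': '', '$': '', '(': '[', ')': ']'}
--
--
-- def _clean_intel_operands(operands: str) -> str:
--     """Clean operands for Intel NASM format.
--
--     Single left-to-right scan with an explicit cursor: each maximal run of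
--     ordinary characters is copied wholesale as one slice, then the special
--     character that ended the run is emitted via the _MAP table ('%'/'$'
--     dropped, '(' -> '[', ')' -> ']'), and the pieces are joined once.
--     """
--     out = []
--     i = 0
--     n = len(operands)
--     while i < n:
--         j = i
--         while j < n and operands[j] not in _MAP:
--             j += 1
--         out.append(operands[i:j])
--         if j < n:
--             out.append(_MAP[operands[j]])
--             j += 1
--         i = j
--     return ''.join(out)
-- ===== Notes on version B (the rewrite author's own statement) =====
-- stated objective: alternative
-- what changed: Replaces A's four whole-string replace passes plus a 20-entry no-op register-renaming loop by a single cursor-driven scan that copies each maximal run of ordinary characters as one slice and emits the table translation of the delimiter that ended the run, joining the pieces once at the end.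
import Mathlib
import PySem

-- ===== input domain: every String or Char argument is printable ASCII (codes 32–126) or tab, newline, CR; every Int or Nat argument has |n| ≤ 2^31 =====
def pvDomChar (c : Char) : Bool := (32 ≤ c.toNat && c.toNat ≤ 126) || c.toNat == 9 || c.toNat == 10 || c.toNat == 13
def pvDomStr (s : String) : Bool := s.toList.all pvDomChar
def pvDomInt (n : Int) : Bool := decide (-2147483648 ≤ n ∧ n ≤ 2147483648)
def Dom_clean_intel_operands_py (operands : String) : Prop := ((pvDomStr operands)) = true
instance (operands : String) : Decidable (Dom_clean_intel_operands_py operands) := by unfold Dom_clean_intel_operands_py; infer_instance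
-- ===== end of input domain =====

-- B replaces A's four whole-string replace passes and its no-op register-renaming loop by a
-- single cursor-driven scan that copies maximal runs of ordinary characters as slices and
-- emits the table translation of each delimiter, joined once; objective: alternative.

-- ===== PORT A =====
-- register_map.items() in insertion order (every key maps to itself)
def pvRegisterMap : List (String × String) :=
  [("eax","eax"), ("ebx","ebx"), ("ecx","ecx"), ("edx","edx"),
   ("rax","rax"), ("rbx","rbx"), ("rcx","rcx"), ("rdx","rdx"),
   ("rsi","rsi"), ("rdi","rdi"), ("rbp","rbp"), ("rsp","rsp"),
   ("r8","r8"), ("r9","r9"), ("r10","r10"), ("r11","r11"),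
   ("r12","r12"), ("r13","r13"), ("r14","r14"), ("r15","r15")]

def clean_intel_operands_py (operands : String) : String :=
  let s1 := PySem.Str.replace operands "%" ""
  let s2 := PySem.Str.replace s1 "$" ""
  let s3 := PySem.Str.replace (PySem.Str.replace s2 "(" "[") ")" "]"
  pvRegisterMap.foldl (fun s p => PySem.Str.replace s p.1 p.2) s3

-- ===== PORT B =====
-- the dict _MAP of Source B
def pvMAP : PySem.Dict Char String := PySem.Dict.ofList [('%',""),('$',""),('(',"["),(')',"]")]

-- inner while loop: "while j < n and operands[j] not in _MAP: j += 1"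
-- (operands[j] is accessed only when j < n, so getD with an unused default is exact)
def pvScan (cs : List Char) (n j : Nat) : Nat :=
  if _h : j < n then
    if (pvMAP.get? (cs.getD j ' ')).isSome then j
    else pvScan cs n (j+1)
  else j
termination_by n - j

-- needed by pvOuterLoop's decreasing_by: the scan never moves the cursor backwards
theorem pvScan_ge (cs : List Char) (n j : Nat) : j ≤ pvScan cs n j := by
  induction j using pvScan.induct (cs := cs) (n := n) with
  | case1 j h hp => rw [pvScan, dif_pos h, if_pos hp]
  | case2 j h hp ih => rw [pvScan, dif_pos h, if_neg hp]; omega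
  | case3 j h => rw [pvScan, dif_neg h]

-- outer while loop: append the slice operands[i:j] (0 ≤ i ≤ j, exact as take/drop),
-- then the mapped delimiter if any, and continue at the next cursor position
def pvOuterLoop (cs : List Char) (n i : Nat) (out : List String) : List String :=
  if _h : i < n then
    if _h2 : pvScan cs n i < n then
      pvOuterLoop cs n (pvScan cs n i + 1)
        (out ++ [String.ofList ((cs.drop i).take (pvScan cs n i - i))]
             ++ [pvMAP.getD (cs.getD (pvScan cs n i) ' ') ""])
    else out ++ [String.ofList ((cs.drop i).take (pvScan cs n i - i))]
  else out
termination_by n - i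
decreasing_by have := pvScan_ge cs n i; omega

def clean_intel_operands_py_alt (operands : String) : String :=
  PySem.Str.join "" (pvOuterLoop operands.toList operands.toList.length 0 [])

-- ===== PRECONDITION & SPEC =====
def Spec_clean_intel_operands_py (operands : String) (out : String) : Prop := out = clean_intel_operands_py_alt operands
instance (operands : String) (out : String) : Decidable (Spec_clean_intel_operands_py operands out) := by unfold Spec_clean_intel_operands_py; infer_instance

-- ===== CLAIM (what is proved, stated in full; the proofs are below) =====
def Claim_equal_clean_intel_operands_py : Prop := ∀ (operands : String), Dom_clean_intel_operands_py operands → Spec_clean_intel_operands_py operands (clean_intel_operands_py operands)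

-- ===== LEMMAS AND PROOFS =====

-- the common value of both programs, per character: '%','$' deleted, '('↦'[', ')'↦']'
def pvCleanChar (c : Char) : Option Char :=
  if c = '%' ∨ c = '$' then none
  else if c = '(' then some '['
  else if c = ')' then some ']'
  else some c

-- ---- A-side: replace with old = new is the identity ----
theorem pv_go_self (old : List Char) (hold : old ≠ []) :
    ∀ (fuel : Nat) (l acc : List Char), l.length ≤ fuel →
      PySem.Chars.replace.go old old fuel l acc = acc.reverse ++ l := by
  intro fuel
  induction fuel with
  | zero =>
    intro l acc h
    have hl : l = [] := List.eq_nil_of_length_eq_zero (Nat.le_zero.mp h)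
    subst hl; simp [PySem.Chars.replace.go]
  | succ n ih =>
    intro l acc h
    cases l with
    | nil => simp [PySem.Chars.replace.go]
    | cons c t =>
      rw [PySem.Chars.replace.go]
      by_cases hp : old.isPrefixOf (c :: t) = true
      · simp only [hp, if_true]
        have hpre : old <+: (c :: t) := List.isPrefixOf_iff_prefix.mp hp
        obtain ⟨r, hr⟩ := hpre
        have hdrop : List.drop old.length (c :: t) = r := by
          rw [← hr]; simp
        have holdlen : 1 ≤ old.length := by
          cases old with
          | nil => exact absurd rfl hold
          | cons _ _ => simp
        have hlen : r.length ≤ n := by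
          have h1 : old.length + r.length = t.length + 1 := by
            have := congrArg List.length hr; simpa using this
          have h2 : t.length + 1 ≤ n + 1 := by simpa using h
          omega
        rw [hdrop, ih r (old.reverse ++ acc) hlen]
        simp [← hr]
      · simp only [hp]
        rw [ih t (c :: acc) (by simp at h; omega)]
        simp

theorem pv_replace_self (s old : List Char) (hold : old ≠ []) :
    PySem.Chars.replace s old old = s := by
  rw [PySem.Chars.replace]
  rw [if_neg (by simpa [List.isEmpty_iff] using hold)]
  simpa using pv_go_self old hold s.length s [] le_rfl

theorem pv_str_replace_self (s o : String) (h : o.toList ≠ []) :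
    PySem.Str.replace s o o = s := by
  rw [PySem.Str.replace, pv_replace_self _ _ h]
  simp

-- ---- A-side: single-character replacement is a flatMap over characters ----
theorem pv_go_single (a : Char) (new : List Char) :
    ∀ (fuel : Nat) (l acc : List Char), l.length ≤ fuel →
      PySem.Chars.replace.go [a] new fuel l acc
        = acc.reverse ++ l.flatMap (fun c => if c = a then new else [c]) := by
  intro fuel
  induction fuel with
  | zero =>
    intro l acc h
    have hl : l = [] := List.eq_nil_of_length_eq_zero (Nat.le_zero.mp h)
    subst hl; simp [PySem.Chars.replace.go]
  | succ n ih =>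
    intro l acc h
    cases l with
    | nil => simp [PySem.Chars.replace.go]
    | cons c t =>
      rw [PySem.Chars.replace.go]
      by_cases hc : c = a
      · subst hc
        have hp : [c].isPrefixOf (c :: t) = true := by simp
        simp only [hp, if_true, List.length_cons, List.length_nil, List.drop_succ_cons, List.drop_zero]
        rw [ih t (new.reverse ++ acc) (by simp at h; omega)]
        simp
      · have hp : [a].isPrefixOf (c :: t) = false := by
          rw [Bool.eq_false_iff]
          intro hcon
          have := List.isPrefixOf_iff_prefix.mp hcon
          obtain ⟨r, hr⟩ := this
          simp at hr
          exact hc hr.1.symm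
        simp only [hp]
        rw [ih t (c :: acc) (by simp at h; omega)]
        simp [hc]

theorem pv_replace_single (l : List Char) (a : Char) (new : List Char) :
    PySem.Chars.replace l [a] new = l.flatMap (fun c => if c = a then new else [c]) := by
  rw [PySem.Chars.replace]
  rw [if_neg (by simp)]
  simpa using pv_go_single a new l.length l [] le_rfl

theorem pv_chain (cs : List Char) :
    ((((cs.flatMap (fun c => if c = '%' then [] else [c])).flatMap
        (fun c => if c = '$' then [] else [c])).flatMap
        (fun c => if c = '(' then ['['] else [c])).flatMap
        (fun c => if c = ')' then [']'] else [c]))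
      = cs.filterMap pvCleanChar := by
  induction cs with
  | nil => simp
  | cons c t ih =>
    simp only [List.flatMap_cons, List.flatMap_append, List.filterMap_cons, ← ih]
    by_cases h1 : c = '%' <;> by_cases h2 : c = '$' <;> by_cases h3 : c = '(' <;> by_cases h4 : c = ')' <;>
      simp_all [pvCleanChar]

theorem pv_fold_id (s : String) :
    pvRegisterMap.foldl (fun s p => PySem.Str.replace s p.1 p.2) s = s := by
  simp only [pvRegisterMap, List.foldl_cons, List.foldl_nil]
  rw [pv_str_replace_self _ "eax" (by decide)]
  rw [pv_str_replace_self _ "ebx" (by decide)]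
  rw [pv_str_replace_self _ "ecx" (by decide)]
  rw [pv_str_replace_self _ "edx" (by decide)]
  rw [pv_str_replace_self _ "rax" (by decide)]
  rw [pv_str_replace_self _ "rbx" (by decide)]
  rw [pv_str_replace_self _ "rcx" (by decide)]
  rw [pv_str_replace_self _ "rdx" (by decide)]
  rw [pv_str_replace_self _ "rsi" (by decide)]
  rw [pv_str_replace_self _ "rdi" (by decide)]
  rw [pv_str_replace_self _ "rbp" (by decide)]
  rw [pv_str_replace_self _ "rsp" (by decide)]
  rw [pv_str_replace_self _ "r8" (by decide)]
  rw [pv_str_replace_self _ "r9" (by decide)]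
  rw [pv_str_replace_self _ "r10" (by decide)]
  rw [pv_str_replace_self _ "r11" (by decide)]
  rw [pv_str_replace_self _ "r12" (by decide)]
  rw [pv_str_replace_self _ "r13" (by decide)]
  rw [pv_str_replace_self _ "r14" (by decide)]
  rw [pv_str_replace_self _ "r15" (by decide)]

set_option maxHeartbeats 1000000 in
theorem pv_A_eq (s : String) :
    clean_intel_operands_py s = String.ofList (s.toList.filterMap pvCleanChar) := by
  unfold clean_intel_operands_py
  rw [pv_fold_id]
  simp only [PySem.Str.replace, String.toList_ofList]
  congr 1
  have e1 : ("%" : String).toList = ['%'] := rfl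
  have e2 : ("$" : String).toList = ['$'] := rfl
  have e3 : ("(" : String).toList = ['('] := rfl
  have e4 : (")" : String).toList = [')'] := rfl
  have e5 : ("[" : String).toList = ['['] := rfl
  have e6 : ("]" : String).toList = [']'] := rfl
  have e0 : ("" : String).toList = [] := rfl
  rw [e1, e2, e3, e4, e5, e6, e0]
  rw [pv_replace_single, pv_replace_single, pv_replace_single, pv_replace_single]
  exact pv_chain s.toList

-- ---- B-side: the dict _MAP as an if-chain ----
set_option maxHeartbeats 1000000 in
theorem pvMAP_eq : pvMAP = PySem.Dict.mk [('%',""),('$',""),('(',"["),(')',"]")] := by decide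

theorem pvMAP_get? (c : Char) :
    pvMAP.get? c = if c = '%' then some "" else if c = '$' then some "" else
      if c = '(' then some "[" else if c = ')' then some "]" else none := by
  by_cases h1 : c = '%'
  · subst h1; decide
  by_cases h2 : c = '$'
  · subst h2; decide
  by_cases h3 : c = '('
  · subst h3; decide
  by_cases h4 : c = ')'
  · subst h4; decide
  have n1 : ¬('%' = c) := fun h => h1 h.symm
  have n2 : ¬('$' = c) := fun h => h2 h.symm
  have n3 : ¬('(' = c) := fun h => h3 h.symm
  have n4 : ¬(')' = c) := fun h => h4 h.symm
  rw [pvMAP_eq]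
  simp only [PySem.Dict.get?_mk_cons, beq_iff_eq, if_neg n1, if_neg n2, if_neg n3, if_neg n4,
    if_neg h1, if_neg h2, if_neg h3, if_neg h4]
  simp [PySem.Dict.get?]

-- ordinary characters (not in _MAP) are kept unchanged by pvCleanChar
theorem pv_plain_clean (c : Char) (h : (pvMAP.get? c).isNone = true) : pvCleanChar c = some c := by
  rw [pvMAP_get?] at h
  by_cases h1 : c = '%' <;> by_cases h2 : c = '$' <;> by_cases h3 : c = '(' <;> by_cases h4 : c = ')' <;>
    simp_all [pvCleanChar]

theorem pv_filterMap_id (l : List Char) (h : ∀ c ∈ l, pvCleanChar c = some c) :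
    l.filterMap pvCleanChar = l := by
  induction l with
  | nil => rfl
  | cons a t ih =>
    rw [List.filterMap_cons, h a (by simp), ih (fun c hc => h c (by simp [hc]))]

-- ''.join over lists of characters is flatten
theorem pv_join_nil (css : List (List Char)) : PySem.Chars.join [] css = css.flatten := by
  induction css with
  | nil => simp [PySem.Chars.join_nil]
  | cons a t ih =>
    cases t with
    | nil => simp [PySem.Chars.join_singleton]
    | cons b u => rw [PySem.Chars.join_cons_cons]; simp [ih]

theorem pv_getD_headD_drop (cs : List Char) (j : Nat) (d : Char) :
    cs.getD j d = (cs.drop j).headD d := by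
  simp [List.getD_eq_getElem?_getD, List.headD_eq_head?_getD, List.head?_drop]

-- pvScan finds exactly the end of the maximal run of ordinary characters
theorem pvScan_eq (cs : List Char) (j : Nat) (hj : j ≤ cs.length) :
    pvScan cs cs.length j
      = j + ((cs.drop j).takeWhile (fun c => (pvMAP.get? c).isNone)).length := by
  induction j using pvScan.induct (cs := cs) (n := cs.length) with
  | case1 j h hp =>
    rw [pvScan, dif_pos h, if_pos hp]
    rw [List.drop_eq_getElem_cons h]
    rw [List.getD_eq_getElem cs ' ' h] at hp
    simp
    intro _
    exact Option.isSome_iff_ne_none.mp hp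
  | case2 j h hp ih =>
    rw [pvScan, dif_pos h, if_neg hp]
    rw [ih (by omega), List.drop_eq_getElem_cons h]
    rw [List.getD_eq_getElem cs ' ' h] at hp
    simp only [List.takeWhile_cons] at *
    simp [Option.not_isSome_iff_eq_none.mp hp]
    omega
  | case3 j h =>
    rw [pvScan, dif_neg h]
    have hnil : cs.drop j = [] := List.drop_eq_nil_of_le (by omega)
    simp [hnil]

-- the outer loop appends exactly the filterMap of the unprocessed suffix
theorem pvOuter_flatten (cs : List Char) :
    ∀ (k i : Nat) (out : List String), cs.length - i ≤ k → i ≤ cs.length →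
      ((pvOuterLoop cs cs.length i out).map String.toList).flatten
        = (out.map String.toList).flatten ++ (cs.drop i).filterMap pvCleanChar := by
  intro k
  induction k with
  | zero =>
    intro i out hk hi
    have h : ¬ i < cs.length := by omega
    rw [pvOuterLoop, dif_neg h]
    have hnil : cs.drop i = [] := List.drop_eq_nil_of_le (by omega)
    simp [hnil]
  | succ k ih =>
    intro i out hk hi
    by_cases h : i < cs.length
    · have hw := pvScan_eq cs i (le_of_lt h)
      set w := (cs.drop i).takeWhile (fun c => (pvMAP.get? c).isNone) with hwdef
      set d := (cs.drop i).dropWhile (fun c => (pvMAP.get? c).isNone) with hddef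
      have hwd : cs.drop i = w ++ d := (List.takeWhile_append_dropWhile).symm
      have htake : (cs.drop i).take (pvScan cs cs.length i - i) = w := by
        rw [hw, Nat.add_sub_cancel_left, hwd]
        exact List.take_left
      have hdropj : cs.drop (pvScan cs cs.length i) = d := by
        rw [hw, ← List.drop_drop, hwd]
        exact List.drop_left
      have hfw : w.filterMap pvCleanChar = w := by
        refine pv_filterMap_id _ (fun c hc => ?_)
        rw [hwdef] at hc
        exact pv_plain_clean c
          (List.mem_takeWhile_imp (p := fun c => (pvMAP.get? c).isNone) hc)
      have hlen := congrArg List.length hwd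
      simp only [List.length_append, List.length_drop] at hlen
      rw [pvOuterLoop, dif_pos h]
      cases hd : d with
      | nil =>
        have hjn : ¬ pvScan cs cs.length i < cs.length := by
          rw [hw]; rw [hd] at hlen; simp at hlen; omega
        rw [dif_neg hjn]
        rw [htake]
        conv_rhs => rw [hwd, hd]
        simp [hfw]
      | cons c r =>
        have hne : (cs.drop i).dropWhile (fun c => (pvMAP.get? c).isNone) ≠ [] := by
          rw [← hddef, hd]; simp
        have hpc : (pvMAP.get? c).isNone = false := by
          have hhead := List.head_dropWhile_not (fun c => (pvMAP.get? c).isNone) hne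
          have hh : ((cs.drop i).dropWhile (fun c => (pvMAP.get? c).isNone)).head hne = c := by
            have h9 : ((cs.drop i).dropWhile (fun c => (pvMAP.get? c).isNone)).head? = some c := by
              rw [← hddef, hd]; rfl
            rw [List.head?_eq_some_head hne] at h9
            exact Option.some_injective _ h9
          rw [hh] at hhead
          simpa using hhead
        have hjlt : pvScan cs cs.length i < cs.length := by
          rw [hw]; rw [hd] at hlen; simp at hlen; omega
        rw [dif_pos hjlt]
        have hgetD : cs.getD (pvScan cs cs.length i) ' ' = c := by
          rw [pv_getD_headD_drop, hdropj, hd]; rfl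
        have hdropj1 : cs.drop (pvScan cs cs.length i + 1) = r := by
          rw [← List.drop_drop, hdropj, hd]; rfl
        rw [ih (pvScan cs cs.length i + 1)
              (out ++ [String.ofList ((cs.drop i).take (pvScan cs cs.length i - i))]
                   ++ [pvMAP.getD (cs.getD (pvScan cs cs.length i) ' ') ""])
              (by have := pvScan_ge cs cs.length i; omega) (by omega)]
        rw [hdropj1, htake, hgetD]
        conv_rhs => rw [hwd, hd]
        have hmapc : (pvMAP.getD c "").toList = (pvCleanChar c).toList := by
          have hc4 : c = '%' ∨ c = '$' ∨ c = '(' ∨ c = ')' := by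
            by_contra hcon
            push Not at hcon
            rw [pvMAP_get?, if_neg hcon.1, if_neg hcon.2.1, if_neg hcon.2.2.1,
              if_neg hcon.2.2.2] at hpc
            simp at hpc
          rcases hc4 with h' | h' | h' | h' <;> subst h' <;> decide
        simp [List.filterMap_append, hfw, List.filterMap_cons, hmapc]
        cases hcc : pvCleanChar c <;> simp [hcc] at hmapc ⊢
    · rw [pvOuterLoop, dif_neg h]
      have hnil : cs.drop i = [] := List.drop_eq_nil_of_le (by omega)
      simp [hnil]

theorem pv_alt_toList (s : String) :
    (clean_intel_operands_py_alt s).toList = s.toList.filterMap pvCleanChar := by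
  unfold clean_intel_operands_py_alt
  rw [PySem.Str.toList_join]
  have he : ("" : String).toList = [] := rfl
  rw [he, pv_join_nil]
  have := pvOuter_flatten s.toList (s.toList.length) 0 [] (by omega) (by omega)
  simpa using this

-- ===== VERDICT (by name: the statement is the Claim_ definition above) =====
theorem clean_intel_operands_py_spec : Claim_equal_clean_intel_operands_py := by
  intro operands _
  unfold Spec_clean_intel_operands_py
  refine String.toList_inj.mp ?_
  rw [pv_A_eq, pv_alt_toList]
  simp [String.toList_ofList]
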